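-- pv_equiv track=rewrite | github.com/arissa/google-code-jam | filefixit.py | num_new
-- ===== SOURCE A (Python) =====
-- def create_tree(given):
-- 	paths = {}
-- 	for path in given:
-- 		folders = path.split("/")[1:]
-- 		curr = paths
-- 		for i in range(len(folders)):
-- 			if folders[i] not in curr:
-- 				curr[folders[i]] = {}
-- 			curr = curr[folders[i]]
-- 	return paths
--
-- def num_new(given_paths, new_path):
-- 	folder_tree = create_tree(given_paths)
-- 	new_path = new_path.split("/")[1:]
-- 	count = 0
-- 	curr = folder_tree
-- 	for folder in new_path:
-- 		if folder in curr:
-- 			curr = curr[folder]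
-- 		else:
-- 			count += 1
-- 	return count
-- ===== SOURCE B (Python) =====
-- def num_new(given_paths, new_path):
--     prefixes = set()
--     for p in given_paths:
--         folders = p.split("/")[1:]
--         for i in range(1, len(folders) + 1):
--             prefixes.add(tuple(folders[:i]))
--     count = 0
--     matched = ()
--     for folder in new_path.split("/")[1:]:
--         cand = matched + (folder,)
--         if cand in prefixes:
--             matched = cand
--         else:
--             count += 1
--     return count
-- ===== Notes on version B (the rewrite author's own statement) =====
-- stated objective: simpler
-- what changed: Replaces the nested-dict trie and pointer descent with one flat set of all nonempty folder-prefix tuples of the given paths, tested by a single membership per folder while extending a matched-prefix tuple only on hits.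
import Mathlib
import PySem

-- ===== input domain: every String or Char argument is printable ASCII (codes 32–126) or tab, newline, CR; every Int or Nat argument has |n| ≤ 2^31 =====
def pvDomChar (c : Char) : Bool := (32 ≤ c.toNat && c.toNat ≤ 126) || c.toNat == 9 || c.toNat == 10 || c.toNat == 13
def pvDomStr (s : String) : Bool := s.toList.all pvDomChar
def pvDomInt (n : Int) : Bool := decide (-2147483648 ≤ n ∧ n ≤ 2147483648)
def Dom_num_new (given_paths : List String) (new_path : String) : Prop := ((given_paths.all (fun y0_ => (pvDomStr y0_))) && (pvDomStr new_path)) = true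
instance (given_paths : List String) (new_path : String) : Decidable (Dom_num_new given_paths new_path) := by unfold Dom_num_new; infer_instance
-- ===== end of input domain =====

-- B replaces A's nested-dict trie with one flat set of all nonempty folder-prefix tuples
-- of the given paths (objective: simpler).

-- ===== PORT A =====
-- The nested Python dicts {str: dict} are a trie; modelled as a mutual inductive
-- (a node with an insertion-ordered association list of children).
-- path.split("/") is ported with PySem.Str.split?; the separator is the non-empty
-- literal "/" so split? is always `some` and the `.getD []` default is never taken.
mutual
inductive PvTrie : Type where
  | node : PvChildren → PvTrie
inductive PvChildren : Type where
  | nil : PvChildren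
  | cons : String → PvTrie → PvChildren → PvChildren
end

-- dict lookup (first matching key)
def PvChildren.find? : PvChildren → String → Option PvTrie
  | .nil, _ => none
  | .cons k t r, f => if k = f then some t else PvChildren.find? r f

-- dict overwrite at an existing key (position kept)
def PvChildren.set : PvChildren → String → PvTrie → PvChildren
  | .nil, _, _ => .nil
  | .cons k t r, f, t' => if k = f then .cons k t' r else .cons k t (PvChildren.set r f t')

-- dict insert of a fresh key (appended at the end)
def PvChildren.append : PvChildren → String → PvTrie → PvChildren
  | .nil, f, t' => .cons f t' .nil
  | .cons k t r, f, t' => .cons k t (PvChildren.append r f t')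

-- A's inner loop 'for i in range(len(folders)): if folders[i] not in curr: curr[folders[i]] = {};
-- curr = curr[folders[i]]' — the mutation through the aliased pointer 'curr' becomes a
-- functional update of the subtree reached at each folder, recursing on the folder list.
def PvTrie.insertPath : PvTrie → List String → PvTrie
  | t, [] => t
  | .node ch, f :: fs =>
    match PvChildren.find? ch f with
    | some t => .node (PvChildren.set ch f (PvTrie.insertPath t fs))
    | none => .node (PvChildren.append ch f (PvTrie.insertPath (.node .nil) fs))

def create_tree (given : List String) : PvTrie :=
  given.foldl
    (fun paths path =>
      paths.insertPath (PySem.List.slice ((PySem.Str.split? path "/").getD []) (some 1) none))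
    (.node .nil)

def num_new (given_paths : List String) (new_path : String) : Int :=
  let folder_tree := create_tree given_paths
  let new_path' := PySem.List.slice ((PySem.Str.split? new_path "/").getD []) (some 1) none
  (new_path'.foldl
    (fun (st : Int × PvTrie) folder =>
      match st.2 with
      | .node ch =>
        match PvChildren.find? ch folder with
        | some t => (st.1, t)
        | none => (st.1 + 1, st.2))
    ((0 : Int), folder_tree)).1

-- ===== PORT B =====
-- the set of all nonempty prefix tuples of the given paths' folder lists
def pvPrefixSet (given : List String) : PySem.Set (List String) :=
  given.foldl
    (fun s p =>
      let folders := PySem.List.slice ((PySem.Str.split? p "/").getD []) (some 1) none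
      (PySem.List.pyRange 1 ((folders.length : Int) + 1) 1).foldl
        (fun s i => PySem.Set.add s (PySem.List.slice folders none (some i))) s)
    PySem.Set.empty

def num_new_alt (given_paths : List String) (new_path : String) : Int :=
  let prefixes := pvPrefixSet given_paths
  (((PySem.List.slice ((PySem.Str.split? new_path "/").getD []) (some 1) none)).foldl
    (fun (st : Int × List String) folder =>
      let cand := st.2 ++ [folder]
      if PySem.Set.contains prefixes cand then (st.1, cand) else (st.1 + 1, st.2))
    ((0 : Int), ([] : List String))).1

-- ===== PRECONDITION & SPEC =====
def Spec_num_new (given_paths : List String) (new_path : String) (out : Int) : Prop := out = num_new_alt given_paths new_path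
instance (given_paths : List String) (new_path : String) (out : Int) : Decidable (Spec_num_new given_paths new_path out) := by unfold Spec_num_new; infer_instance

-- ===== CLAIM (what is proved, stated in full; the proofs are below) =====
def Claim_equal_num_new : Prop := ∀ (given_paths : List String) (new_path : String), Dom_num_new given_paths new_path → Spec_num_new given_paths new_path (num_new given_paths new_path)

-- ===== LEMMAS AND PROOFS =====

-- descending a trie along a folder list
def pvDescend : PvTrie → List String → Option PvTrie
  | t, [] => some t
  | .node ch, f :: fs =>
    match PvChildren.find? ch f with
    | some t => pvDescend t fs
    | none => none

theorem pvFind?_set (ch : PvChildren) (f g : String) (t0 t' : PvTrie)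
    (h : PvChildren.find? ch f = some t0) :
    PvChildren.find? (PvChildren.set ch f t') g =
      if g = f then some t' else PvChildren.find? ch g := by
  match ch with
  | .nil => simp [PvChildren.find?] at h
  | .cons k t r =>
    by_cases hkf : k = f
    · subst hkf
      by_cases hgk : g = k
      · simp [PvChildren.set, PvChildren.find?, hgk]
      · simp [PvChildren.set, PvChildren.find?, hgk, Ne.symm hgk]
    · simp only [PvChildren.find?, if_neg hkf] at h
      by_cases hkg : k = g
      · subst hkg
        simp [PvChildren.set, PvChildren.find?, hkf]
      · simp only [PvChildren.set, if_neg hkf, PvChildren.find?, if_neg hkg]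
        exact pvFind?_set r f g t0 t' h

theorem pvFind?_append (ch : PvChildren) (f g : String) (t' : PvTrie) :
    PvChildren.find? (PvChildren.append ch f t') g =
      match PvChildren.find? ch g with
      | some u => some u
      | none => if g = f then some t' else none := by
  match ch with
  | .nil =>
    by_cases hgf : g = f
    · simp [PvChildren.append, PvChildren.find?, hgf]
    · simp [PvChildren.append, PvChildren.find?, hgf, Ne.symm hgf]
  | .cons k t r =>
    by_cases hkg : k = g
    · simp [PvChildren.append, PvChildren.find?, hkg]
    · simp only [PvChildren.append, PvChildren.find?, if_neg hkg]
      exact pvFind?_append r f g t'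

theorem pvDescend_insertPath (m l : List String) (t : PvTrie) :
    (pvDescend (t.insertPath l) m).isSome = ((pvDescend t m).isSome || m.isPrefixOf l) := by
  induction m generalizing t l with
  | nil => simp [pvDescend, List.isPrefixOf]
  | cons f fs ih =>
    obtain ⟨ch⟩ := t
    cases l with
    | nil => simp [PvTrie.insertPath, List.isPrefixOf]
    | cons g gs =>
      simp only [PvTrie.insertPath]
      cases hg : PvChildren.find? ch g with
      | some t0 =>
        simp only [pvDescend, pvFind?_set ch g _ t0 _ hg]
        by_cases hfg : f = g
        · subst hfg
          simp [hg, ih, List.isPrefixOf]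
        · rw [if_neg hfg]
          cases PvChildren.find? ch f <;>
            simp [List.isPrefixOf, hfg]
      | none =>
        simp only [pvDescend, pvFind?_append ch g f _]
        cases hf : PvChildren.find? ch f with
        | some u =>
          have hfg : f ≠ g := by rintro rfl; rw [hf] at hg; cases hg
          simp [List.isPrefixOf, hfg]
        | none =>
          by_cases hfg : f = g
          · subst hfg
            rw [if_pos rfl, ih]
            cases fs <;> simp [pvDescend, PvChildren.find?, List.isPrefixOf]
          · simp [List.isPrefixOf, hfg]

theorem pvDescend_foldl (gp : List String) (F : String → List String) (t0 : PvTrie)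
    (m : List String) :
    (pvDescend (gp.foldl (fun t p => t.insertPath (F p)) t0) m).isSome =
      ((pvDescend t0 m).isSome || gp.any (fun p => m.isPrefixOf (F p))) := by
  induction gp generalizing t0 with
  | nil => simp
  | cons p gp ih =>
    simp only [List.foldl_cons, ih, pvDescend_insertPath, List.any_cons]
    ac_rfl

-- the trie contains exactly the nonempty prefixes of the inserted folder lists
theorem pvDescend_create_tree (gp : List String) (m : List String) (hm : m ≠ []) :
    (pvDescend (create_tree gp) m).isSome =
      gp.any (fun p =>
        m.isPrefixOf (PySem.List.slice ((PySem.Str.split? p "/").getD []) (some 1) none)) := by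
  unfold create_tree
  rw [pvDescend_foldl]
  obtain ⟨f, fs, rfl⟩ := List.exists_cons_of_ne_nil hm
  simp [pvDescend, PvChildren.find?]

-- the flat set contains exactly the nonempty prefixes of the folder lists
theorem pvMem_prefixSet (gp : List String) (m : List String) (hm : m ≠ []) :
    (m ∈ pvPrefixSet gp) ↔
      gp.any (fun p =>
        m.isPrefixOf (PySem.List.slice ((PySem.Str.split? p "/").getD []) (some 1) none)) = true := by
  unfold pvPrefixSet
  suffices h : ∀ (s : PySem.Set (List String)),
      m ∈ gp.foldl
        (fun s p =>
          let folders := PySem.List.slice ((PySem.Str.split? p "/").getD []) (some 1) none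
          (PySem.List.pyRange 1 ((folders.length : Int) + 1) 1).foldl
            (fun s i => PySem.Set.add s (PySem.List.slice folders none (some i))) s) s ↔
        (m ∈ s ∨ gp.any (fun p =>
          m.isPrefixOf (PySem.List.slice ((PySem.Str.split? p "/").getD []) (some 1) none)) = true) by
    rw [h PySem.Set.empty]
    simp [PySem.Set.empty]
  intro s
  induction gp generalizing s with
  | nil => simp
  | cons p gp ih =>
    simp only [List.foldl_cons, ih, List.any_cons, Bool.or_eq_true]
    set xs := PySem.List.slice ((PySem.Str.split? p "/").getD []) (some 1) none with hxs
    have hmem : m ∈ (PySem.List.pyRange 1 ((xs.length : Int) + 1) 1).foldl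
        (fun s i => PySem.Set.add s (PySem.List.slice xs none (some i))) s ↔
        (m ∈ s ∨ m.isPrefixOf xs = true) := by
      rw [PySem.Set.mem_foldl_add]
      constructor
      · rintro (hs | ⟨i, hi, rfl⟩)
        · exact Or.inl hs
        · right
          rw [PySem.List.mem_pyRange_one] at hi
          rw [PySem.List.slice_to _ (by omega), List.isPrefixOf_iff_prefix]
          exact List.take_prefix _ _
      · rintro (hs | hpre)
        · exact Or.inl hs
        · right
          refine ⟨(m.length : Int), ?_, ?_⟩
          · rw [PySem.List.mem_pyRange_one]
            rw [List.isPrefixOf_iff_prefix] at hpre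
            have hle := hpre.length_le
            have hpos : 0 < m.length := List.length_pos_iff.mpr hm
            omega
          · rw [PySem.List.slice_to _ (by positivity)]
            rw [List.isPrefixOf_iff_prefix, List.prefix_iff_eq_take] at hpre
            simpa using hpre
    rw [hmem]
    exact or_assoc

theorem pvDescend_append_singleton (t : PvTrie) (a : List String) (f : String) :
    pvDescend t (a ++ [f]) =
      (pvDescend t a).bind (fun s => match s with | .node ch => PvChildren.find? ch f) := by
  induction a generalizing t with
  | nil =>
    obtain ⟨ch⟩ := t
    simp only [List.nil_append, pvDescend, Option.bind_some]
    cases PvChildren.find? ch f <;> simp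
  | cons g gs ih =>
    obtain ⟨ch⟩ := t
    simp only [List.cons_append, pvDescend]
    cases PvChildren.find? ch g with
    | some t' => exact ih t'
    | none => rfl

-- the two loops, run over the same folder list, keep the same count
theorem pvLoop_eq (fs : List String) (tree : PvTrie) (S : PySem.Set (List String))
    (hS : ∀ m : List String, m ≠ [] → (m ∈ S ↔ (pvDescend tree m).isSome = true))
    (count : Int) (matched : List String) (curr : PvTrie)
    (hcurr : pvDescend tree matched = some curr) :
    (fs.foldl
      (fun (st : Int × PvTrie) folder =>
        match st.2 with
        | .node ch =>
          match PvChildren.find? ch folder with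
          | some t => (st.1, t)
          | none => (st.1 + 1, st.2))
      (count, curr)).1 =
    (fs.foldl
      (fun (st : Int × List String) folder =>
        let cand := st.2 ++ [folder]
        if PySem.Set.contains S cand then (st.1, cand) else (st.1 + 1, st.2))
      (count, matched)).1 := by
  induction fs generalizing count matched curr with
  | nil => rfl
  | cons f fs ih =>
    obtain ⟨ch⟩ := curr
    have hdes : pvDescend tree (matched ++ [f]) = PvChildren.find? ch f := by
      rw [pvDescend_append_singleton, hcurr]; rfl
    have hmemiff := hS (matched ++ [f]) (by simp)
    rw [hdes] at hmemiff
    simp only [List.foldl_cons]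
    cases hf : PvChildren.find? ch f with
    | some t' =>
      have hmem : PySem.Set.contains S (matched ++ [f]) = true := by
        rw [PySem.Set.contains_iff, hmemiff, hf]; rfl
      simp only [hmem, if_pos]
      exact ih count (matched ++ [f]) t' (by rw [hdes, hf])
    | none =>
      have hmem : PySem.Set.contains S (matched ++ [f]) = false := by
        rw [← Bool.not_eq_true, PySem.Set.contains_iff, hmemiff, hf]
        simp
      simp only [hmem, Bool.false_eq_true, if_false]
      exact ih (count + 1) matched (.node ch) hcurr

-- ===== VERDICT (by name: the statement is the Claim_ definition above) =====
theorem num_new_spec : Claim_equal_num_new := by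
  intro gp np _
  unfold Spec_num_new num_new num_new_alt
  apply pvLoop_eq
  · intro m hm
    rw [pvMem_prefixSet gp m hm, pvDescend_create_tree gp m hm]
  · rfl
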